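-- pv_equiv track=rewrite | github.com/alan23273850/flag-analysis | decoder_commute_verify.py | fixed_commutes_with_all_generators
-- ===== SOURCE A (Python) =====
-- from typing import Dict, List, Tuple
--
-- def fixed_commutes_with_all_generators(
--     fixed_x: List[bool], fixed_z: List[bool], pairs: List[Tuple[str, str]]
-- ) -> bool:
--     n = len(fixed_x)
--     for xs, zs in pairs:
--         if len(xs) != n or len(zs) != n:
--             raise ValueError(f"Generator length mismatch: n_data={n}, xs={len(xs)}")
--         acc = False
--         for j in range(n):
--             if zs[j] == "1":
--                 acc ^= fixed_x[j]
--             if xs[j] == "1":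
--                 acc ^= fixed_z[j]
--         if acc:
--             return False
--     return True
-- ===== SOURCE B (Python) =====
-- def _mask_bits(bits):
--     m = 0
--     for b in reversed(bits):
--         m = (m << 1) | (1 if b else 0)
--     return m
--
--
-- def _mask_str(s):
--     m = 0
--     for c in reversed(s):
--         m = (m << 1) | (1 if c == "1" else 0)
--     return m
--
--
-- def fixed_commutes_with_all_generators(fixed_x, fixed_z, pairs):
--     n = len(fixed_x)
--     fx = _mask_bits(fixed_x)
--     fz = _mask_bits(fixed_z)
--     for xs, zs in pairs:
--         if len(xs) != n or len(zs) != n: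
--             raise ValueError(f"Generator length mismatch: n_data={n}, xs={len(xs)}")
--         if ((fx & _mask_str(zs)) ^ (fz & _mask_str(xs))).bit_count() & 1:
--             return False
--     return True
-- ===== Notes on version B (the rewrite author's own statement) =====
-- stated objective: alternative
-- what changed: B packs the fixed operator and each generator into integer bitmasks and decides each generator by the popcount parity of (fx & gz) ^ (fz & gx), replacing A's per-column scan with branching XOR accumulation by bitwise integer arithmetic.
-- outside the precondition, e.g. on fixed_commutes_with_all_generators([True], [], [('0', '1'), ('1', '0')]): A returns False, B returns False
import Mathlib
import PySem

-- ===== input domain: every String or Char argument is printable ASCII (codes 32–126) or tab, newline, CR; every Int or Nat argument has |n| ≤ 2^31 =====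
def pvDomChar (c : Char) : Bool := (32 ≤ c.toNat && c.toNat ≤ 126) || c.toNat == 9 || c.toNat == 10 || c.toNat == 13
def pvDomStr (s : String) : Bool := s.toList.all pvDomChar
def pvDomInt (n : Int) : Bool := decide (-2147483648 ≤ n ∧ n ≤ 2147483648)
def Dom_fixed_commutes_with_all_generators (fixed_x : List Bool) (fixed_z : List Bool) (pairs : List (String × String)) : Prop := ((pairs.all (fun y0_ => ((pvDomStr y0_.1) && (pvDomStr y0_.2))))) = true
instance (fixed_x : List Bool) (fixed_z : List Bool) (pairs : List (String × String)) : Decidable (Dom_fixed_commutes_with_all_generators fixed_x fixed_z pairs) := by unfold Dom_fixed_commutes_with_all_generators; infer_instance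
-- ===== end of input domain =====

-- B packs the fixed operator and each generator into integer bitmasks and decides each generator by
-- the popcount parity of (fx &&& gz) ^^^ (fz &&& gx) instead of A's per-column xor scan (alternative).


-- ===== PORT A =====
-- inner 'for j in range(n)' loop of A; fixed_x[j]/fixed_z[j] via pyGetD (exact on Pre_: j < n = len(fixed_x),
-- and the fixed_z read is only reached when xs[j] == '1', which Pre_ keeps below len(fixed_z))
def pvA_gen (fixed_x fixed_z : List Bool) (n : Nat) (xs zs : String) : Bool :=
  (List.range n).foldl (fun (acc : Bool) (j : Nat) =>
    let acc := if PySem.Str.pyGet? zs (j : Int) = some '1' then acc ^^ PySem.List.pyGetD fixed_x (j : Int) false else acc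
    if PySem.Str.pyGet? xs (j : Int) = some '1' then acc ^^ PySem.List.pyGetD fixed_z (j : Int) false else acc) false

-- outer 'for xs, zs in pairs' loop of A; the 'raise ValueError' branch (excluded by Pre_) is rendered as 'false'
def pvA_go (fixed_x fixed_z : List Bool) (n : Nat) : List (String × String) → Bool
  | [] => true
  | (xs, zs) :: rest =>
    if PySem.Str.len xs ≠ (n : Int) ∨ PySem.Str.len zs ≠ (n : Int) then false
    else if pvA_gen fixed_x fixed_z n xs zs then false
    else pvA_go fixed_x fixed_z n rest

def fixed_commutes_with_all_generators (fixed_x : List Bool) (fixed_z : List Bool) (pairs : List (String × String)) : Bool :=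
  pvA_go fixed_x fixed_z fixed_x.length pairs

-- ===== PORT B =====
-- _mask_bits of Source B: m = 0; for b in reversed(bits): m = (m << 1) | (1 if b else 0)
def pvMaskBits (bits : List Bool) : Nat :=
  bits.reverse.foldl (fun m b => (m <<< 1) ||| (if b then 1 else 0)) 0

-- _mask_str of Source B: same shift loop over reversed(s) with bit (c == '1')
def pvMaskStr (s : String) : Nat :=
  s.toList.reverse.foldl (fun m c => (m <<< 1) ||| (if c == '1' then 1 else 0)) 0

-- int.bit_count (a Python builtin, ported by hand: number of set bits)
def pvBitCount (n : Nat) : Nat :=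
  if h : n = 0 then 0 else n % 2 + pvBitCount (n / 2)
decreasing_by exact Nat.div_lt_self (Nat.pos_of_ne_zero h) one_lt_two

-- loop of Source B; its 'raise ValueError' (excluded by Pre_) is rendered as 'false'
def pvB_go (n : Nat) (fx fz : Nat) : List (String × String) → Bool
  | [] => true
  | (xs, zs) :: rest =>
    if PySem.Str.len xs ≠ (n : Int) ∨ PySem.Str.len zs ≠ (n : Int) then false
    else if pvBitCount ((fx &&& pvMaskStr zs) ^^^ (fz &&& pvMaskStr xs)) % 2 == 1 then false
    else pvB_go n fx fz rest

def fixed_commutes_with_all_generators_alt (fixed_x : List Bool) (fixed_z : List Bool) (pairs : List (String × String)) : Bool :=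
  pvB_go fixed_x.length (pvMaskBits fixed_x) (pvMaskBits fixed_z) pairs

-- ===== PRECONDITION & SPEC =====
-- Pre_ excludes the inputs where A raises: a generator string of length ≠ len(fixed_x) (ValueError),
-- or a '1' in some xs at an index beyond len(fixed_z) (IndexError on fixed_z); when such a pair sits
-- after a non-commuting one, A returns False early without reaching it, and B returns False there too.
def Pre_fixed_commutes_with_all_generators (fixed_x : List Bool) (fixed_z : List Bool) (pairs : List (String × String)) : Prop :=
  ∀ p ∈ pairs, p.1.toList.length = fixed_x.length ∧ p.2.toList.length = fixed_x.length ∧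
    ((p.1.toList.drop fixed_z.length).all (fun ch => ch != '1')) = true
instance (fixed_x : List Bool) (fixed_z : List Bool) (pairs : List (String × String)) : Decidable (Pre_fixed_commutes_with_all_generators fixed_x fixed_z pairs) := by unfold Pre_fixed_commutes_with_all_generators; infer_instance

def pvWitness_fixed_commutes_with_all_generators : List Bool × List Bool × (List (String × String)) :=
  ([true, false], [false, true], [("10", "01"), ("11", "11")])

def Spec_fixed_commutes_with_all_generators (fixed_x : List Bool) (fixed_z : List Bool) (pairs : List (String × String)) (out : Bool) : Prop := out = fixed_commutes_with_all_generators_alt fixed_x fixed_z pairs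
instance (fixed_x : List Bool) (fixed_z : List Bool) (pairs : List (String × String)) (out : Bool) : Decidable (Spec_fixed_commutes_with_all_generators fixed_x fixed_z pairs out) := by unfold Spec_fixed_commutes_with_all_generators; infer_instance

-- ===== CLAIM (what is proved, stated in full; the proofs are below) =====
def Claim_equal_fixed_commutes_with_all_generators : Prop := ∀ (fixed_x : List Bool) (fixed_z : List Bool) (pairs : List (String × String)), Dom_fixed_commutes_with_all_generators fixed_x fixed_z pairs → Pre_fixed_commutes_with_all_generators fixed_x fixed_z pairs → Spec_fixed_commutes_with_all_generators fixed_x fixed_z pairs (fixed_commutes_with_all_generators fixed_x fixed_z pairs)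

-- ===== LEMMAS AND PROOFS =====

-- structural companions of the mask-building loops
def pvMB : List Bool → Nat
  | [] => 0
  | b :: t => 2 * pvMB t + (if b then 1 else 0)

def pvMS : List Char → Nat
  | [] => 0
  | c :: t => 2 * pvMS t + (if c == '1' then 1 else 0)

theorem pv_two_mul_or_one (m : Nat) : 2 * m ||| 1 = 2 * m + 1 := by
  apply Nat.eq_of_testBit_eq
  intro i
  cases i with
  | zero =>
      have hm : (2 * m + 1) % 2 = 1 := by omega
      simp [Nat.testBit_or, Nat.testBit_zero, hm]
  | succ i =>
      rw [Nat.testBit_or]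
      have h1 : Nat.testBit 1 (i + 1) = false := by rw [Nat.testBit_succ]; simp
      rw [h1, Bool.or_false, Nat.testBit_succ, Nat.testBit_succ]
      congr 1
      omega

theorem pv_or_bit (m : Nat) (b : Bool) :
    (m <<< 1) ||| (if b then 1 else 0) = 2 * m + (if b then 1 else 0) := by
  have hs : m <<< 1 = 2 * m := by rw [Nat.shiftLeft_eq]; ring
  cases b
  · simp [hs]
  · simpa [hs] using pv_two_mul_or_one m

theorem pvMaskBits_eq (l : List Bool) : pvMaskBits l = pvMB l := by
  unfold pvMaskBits
  rw [List.foldl_reverse]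
  induction l with
  | nil => rfl
  | cons b t ih => rw [List.foldr_cons, ih, pv_or_bit]; rfl

theorem pvMaskStr_eq (s : String) : pvMaskStr s = pvMS s.toList := by
  unfold pvMaskStr
  rw [List.foldl_reverse]
  induction s.toList with
  | nil => rfl
  | cons c t ih => rw [List.foldr_cons, ih, pv_or_bit]; rfl

theorem pvMB_testBit (l : List Bool) (j : Nat) : (pvMB l).testBit j = l.getD j false := by
  induction l generalizing j with
  | nil => simp [pvMB]
  | cons b t ih =>
      cases j with
      | zero =>
          have hm : (2 * pvMB t + (if b then 1 else 0)) % 2 = if b then 1 else 0 := by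
            cases b <;> simp <;> omega
          rw [pvMB, Nat.testBit_zero, hm]
          cases b <;> rfl
      | succ j =>
          have hd : (2 * pvMB t + (if b then 1 else 0)) / 2 = pvMB t := by
            cases b <;> simp <;> omega
          rw [pvMB, Nat.testBit_succ, hd, ih]
          rfl

theorem pvMS_testBit (l : List Char) (j : Nat) : (pvMS l).testBit j = (l.getD j ' ' == '1') := by
  induction l generalizing j with
  | nil => simp [pvMS]
  | cons c t ih =>
      cases j with
      | zero =>
          have hm : (2 * pvMS t + (if c == '1' then 1 else 0)) % 2 = if c == '1' then 1 else 0 := by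
            cases h : (c == '1') <;> simp <;> omega
          rw [pvMS, Nat.testBit_zero, hm]
          cases h : (c == '1') <;> simp [List.getD, h]
      | succ j =>
          have hd : (2 * pvMS t + (if c == '1' then 1 else 0)) / 2 = pvMS t := by
            cases h : (c == '1') <;> simp <;> omega
          rw [pvMS, Nat.testBit_succ, hd, ih]
          rfl

theorem pvMB_lt (l : List Bool) : pvMB l < 2 ^ l.length := by
  induction l with
  | nil => simp [pvMB]
  | cons b t ih => rw [pvMB, List.length_cons, pow_succ]; cases b <;> simp <;> omega

theorem pvMS_lt (l : List Char) : pvMS l < 2 ^ l.length := by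
  induction l with
  | nil => simp [pvMS]
  | cons c t ih =>
      rw [pvMS, List.length_cons, pow_succ]
      cases h : (c == '1') <;> simp <;> try omega

theorem pvBitCount_unfold (M : Nat) : pvBitCount M = M % 2 + pvBitCount (M / 2) := by
  by_cases h : M = 0
  · subst h; simp
  · rw [pvBitCount]; simp [h]

theorem pvBitCount_eq (n : Nat) (M : Nat) (h : M < 2 ^ n) :
    pvBitCount M = (List.range n).countP (fun k => M.testBit k) := by
  induction n generalizing M with
  | zero =>
      interval_cases M
      rw [pvBitCount]; simp
  | succ n ih =>
      have hdiv : M / 2 < 2 ^ n := by rw [pow_succ] at h; omega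
      rw [pvBitCount_unfold, ih (M / 2) hdiv, List.range_succ_eq_map, List.countP_cons,
        List.countP_map]
      have hc : List.countP ((fun k => M.testBit k) ∘ Nat.succ) (List.range n)
          = List.countP (fun k => (M / 2).testBit k) (List.range n) := by
        apply List.countP_congr
        intro k _
        simp [Function.comp, Nat.testBit_succ]
      have hm : (if (fun k => M.testBit k) 0 = true then 1 else 0) = M % 2 := by
        simp only [Nat.testBit_zero]
        rcases Nat.mod_two_eq_zero_or_one M with h2 | h2 <;> simp [h2]
      rw [hc, hm]
      omega

-- xor-fold over a list is the parity of the count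
theorem pv_foldl_xor_parity (g : Nat → Bool) (l : List Nat) (a : Bool) :
    l.foldl (fun acc j => acc ^^ g j) a = (a ^^ (l.countP g % 2 == 1)) := by
  induction l generalizing a with
  | nil => simp
  | cons h t ih =>
      simp only [List.foldl_cons, ih, List.countP_cons]
      cases hg : g h <;>
        rcases Nat.mod_two_eq_zero_or_one (t.countP g) with h2 | h2 <;>
        simp [Nat.add_mod, h2]

-- option-lookup form of the char test agrees with the getD form used by the mask bits
theorem pv_char_test (l : List Char) (k : Nat) :
    ((l[k]? : Option Char) == some '1') = (l.getD k ' ' == '1') := by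
  cases h : l[k]? with
  | none => simp [List.getD, h]
  | some c => simp [List.getD, h]

-- per-generator: A's xor column scan = B's popcount parity of the mask expression
theorem pv_pair_eq (fixed_x fixed_z : List Bool) (xs zs : String)
    (h1 : xs.toList.length = fixed_x.length) :
    pvA_gen fixed_x fixed_z fixed_x.length xs zs
      = (pvBitCount ((pvMaskBits fixed_x &&& pvMaskStr zs) ^^^ (pvMaskBits fixed_z &&& pvMaskStr xs)) % 2 == 1) := by
  have hstep : (fun (acc : Bool) (j : Nat) =>
      let acc := if PySem.Str.pyGet? zs (j : Int) = some '1' then acc ^^ PySem.List.pyGetD fixed_x (j : Int) false else acc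
      if PySem.Str.pyGet? xs (j : Int) = some '1' then acc ^^ PySem.List.pyGetD fixed_z (j : Int) false else acc)
      = (fun (acc : Bool) (j : Nat) => acc ^^
          (((PySem.Str.pyGet? zs (j : Int) == some '1') && PySem.List.pyGetD fixed_x (j : Int) false)
            ^^ ((PySem.Str.pyGet? xs (j : Int) == some '1') && PySem.List.pyGetD fixed_z (j : Int) false))) := by
    funext acc j
    by_cases hz : zs.toList[j]? = some '1' <;>
      by_cases hx : xs.toList[j]? = some '1' <;>
        simp [hz, hx, beq_eq_decide]
  set M := (pvMaskBits fixed_x &&& pvMaskStr zs) ^^^ (pvMaskBits fixed_z &&& pvMaskStr xs) with hM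
  have hMlt : M < 2 ^ fixed_x.length := by
    apply Nat.xor_lt_two_pow
    · exact lt_of_le_of_lt Nat.and_le_left (by rw [pvMaskBits_eq]; exact pvMB_lt fixed_x)
    · exact lt_of_le_of_lt Nat.and_le_right (by rw [pvMaskStr_eq, ← h1]; exact pvMS_lt xs.toList)
  have hbit : ∀ k : Nat, M.testBit k
      = (((PySem.Str.pyGet? zs (k : Int) == some '1') && PySem.List.pyGetD fixed_x (k : Int) false)
          ^^ ((PySem.Str.pyGet? xs (k : Int) == some '1') && PySem.List.pyGetD fixed_z (k : Int) false)) := by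
    intro k
    rw [hM, Nat.testBit_xor, Nat.testBit_and, Nat.testBit_and, pvMaskBits_eq, pvMaskBits_eq,
      pvMaskStr_eq, pvMaskStr_eq, pvMB_testBit, pvMB_testBit, pvMS_testBit, pvMS_testBit,
      PySem.Str.pyGet?_natCast, PySem.Str.pyGet?_natCast, PySem.List.pyGetD_natCast,
      PySem.List.pyGetD_natCast, pv_char_test, pv_char_test, Bool.and_comm]
    congr 1
    rw [Bool.and_comm]
  rw [pvA_gen, hstep, pv_foldl_xor_parity, Bool.false_xor,
    pvBitCount_eq fixed_x.length M hMlt]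
  congr 1
  congr 1
  apply List.countP_congr
  intro k _
  rw [hbit k]

-- the outer loops agree once every pair satisfies Pre_
theorem pv_go_eq (fixed_x fixed_z : List Bool) (pairs : List (String × String))
    (hp : ∀ p ∈ pairs, p.1.toList.length = fixed_x.length ∧ p.2.toList.length = fixed_x.length) :
    pvA_go fixed_x fixed_z fixed_x.length pairs
      = pvB_go fixed_x.length (pvMaskBits fixed_x) (pvMaskBits fixed_z) pairs := by
  induction pairs with
  | nil => rfl
  | cons p rest ih =>
      obtain ⟨h1, h2⟩ := hp p (List.mem_cons_self ..)
      have hrest := ih (fun q hq => hp q (List.mem_cons_of_mem _ hq))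
      obtain ⟨xs, zs⟩ := p
      dsimp only at h1 h2
      simp only [pvA_go, pvB_go]
      rw [← pv_pair_eq fixed_x fixed_z xs zs h1, hrest]

-- ===== VERDICT (by name: the statement is the Claim_ definition above) =====
theorem fixed_commutes_with_all_generators_spec : Claim_equal_fixed_commutes_with_all_generators := by
  intro fixed_x fixed_z pairs _ hpre
  unfold Spec_fixed_commutes_with_all_generators fixed_commutes_with_all_generators
    fixed_commutes_with_all_generators_alt
  exact pv_go_eq fixed_x fixed_z pairs (fun p hp => ⟨(hpre p hp).1, (hpre p hp).2.1⟩)
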